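-- pv_equiv track=rewrite | github.com/Rochelly/Rox-Iptables-Manager | em_classes/firewall_libs/file_utils.py | split_port_10
-- ===== SOURCE A (Python) =====
-- def split_port_10(ports):
--     substrings = ports.split(",")
--     sublists = []
--     temp = []
--
--     for s in substrings:
--         temp.append(s)
--         if len(temp) == 10:
--             sublists.append(",".join(temp))
--             temp = []
--
--     if len(temp) > 0:
--         sublists.append(",".join(temp))
--     return sublists
-- ===== SOURCE B (Python) =====
-- def split_port_10(ports):
--     substrings = ports.split(",")
--     return [",".join(substrings[i:i + 10]) for i in range(0, len(substrings), 10)]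
-- ===== Notes on version B (the rewrite author's own statement) =====
-- stated objective: idiomatic
-- what changed: Replaces the explicit accumulator loop with conditional flushing by a single stride-and-slice comprehension over chunk start indices.
import Mathlib
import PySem

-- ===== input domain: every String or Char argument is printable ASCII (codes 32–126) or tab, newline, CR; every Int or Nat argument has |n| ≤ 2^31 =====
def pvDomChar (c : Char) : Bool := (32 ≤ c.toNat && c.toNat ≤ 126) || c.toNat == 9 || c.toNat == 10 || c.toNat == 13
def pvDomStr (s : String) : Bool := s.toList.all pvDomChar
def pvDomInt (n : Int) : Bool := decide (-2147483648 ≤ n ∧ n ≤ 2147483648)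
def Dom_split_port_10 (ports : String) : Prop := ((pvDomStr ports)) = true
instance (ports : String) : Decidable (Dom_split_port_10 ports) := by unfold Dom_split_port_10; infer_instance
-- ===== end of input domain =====

-- B replaces A's explicit accumulator loop with conditional flushing by a
-- stride-and-slice comprehension over chunk start indices (idiomatic; same cost).

-- ===== PORT A =====
-- one fold step of A's loop: append s to temp, flush when temp reaches 10
def pvStepA (st : List String × List String) (s : String) : List String × List String :=
  let temp := st.2 ++ [s]
  if temp.length == 10 then (st.1 ++ [PySem.Str.join "," temp], []) else (st.1, temp)

def split_port_10 (ports : String) : List String :=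
  let substrings := (PySem.Str.split? ports ",").getD []   -- sep "," ≠ "", so split? is always some
  let st := substrings.foldl pvStepA ([], [])
  if st.2.length > 0 then st.1 ++ [PySem.Str.join "," st.2] else st.1

-- ===== PORT B =====
def split_port_10_alt (ports : String) : List String :=
  let substrings := (PySem.Str.split? ports ",").getD []   -- sep "," ≠ "", so split? is always some
  (PySem.List.pyRange 0 (substrings.length : Int) 10).map
    (fun i => PySem.Str.join "," (PySem.List.slice substrings (some i) (some (i + 10))))

-- ===== CLAIM (what is proved, stated in full; the proofs are below) =====
def Spec_split_port_10 (ports : String) (out : List String) : Prop := out = split_port_10_alt ports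
instance (ports : String) (out : List String) : Decidable (Spec_split_port_10 ports out) := by unfold Spec_split_port_10; infer_instance

def Claim_equal_split_port_10 : Prop := ∀ (ports : String), Dom_split_port_10 ports → Spec_split_port_10 ports (split_port_10 ports)

-- ===== LEMMAS AND PROOFS =====

-- reference chunking: join the first 10, recurse on the rest
def pvChunks : List String → List String
  | [] => []
  | x :: xs => PySem.Str.join "," ((x :: xs).take 10) :: pvChunks (xs.drop 9)
  termination_by l => l.length
  decreasing_by simp

-- A's fold: the accumulator is only a prefix
theorem pvChunks_nil : pvChunks [] = [] := pvChunks.eq_1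

theorem pvChunks_cons (x : String) (xs : List String) :
    pvChunks (x :: xs) = PySem.Str.join "," ((x :: xs).take 10) :: pvChunks (xs.drop 9) :=
  pvChunks.eq_2 x xs

theorem pvStepA_prefix (acc temp : List String) (s : String) :
    pvStepA (acc, temp) s = (acc ++ (pvStepA ([], temp) s).1, (pvStepA ([], temp) s).2) := by
  simp only [pvStepA]
  split <;> simp

theorem pvFoldA_prefix (l : List String) (acc temp : List String) :
    l.foldl pvStepA (acc, temp) =
      (acc ++ (l.foldl pvStepA ([], temp)).1, (l.foldl pvStepA ([], temp)).2) := by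
  induction l generalizing acc temp with
  | nil => simp
  | cons s rest ih =>
      rcases hp : pvStepA ([], temp) s with ⟨A1, T1⟩
      rw [List.foldl_cons, List.foldl_cons, pvStepA_prefix acc temp s, hp, ih]
      rw [ih A1 T1]
      simp

-- consuming a short prefix only grows temp, never flushes
theorem pvFoldA_consume (t : List String) (l : List String) (acc temp : List String)
    (h : (temp ++ t).length < 10) :
    (t ++ l).foldl pvStepA (acc, temp) = l.foldl pvStepA (acc, temp ++ t) := by
  induction t generalizing temp with
  | nil => simp
  | cons s rest ih =>
      simp only [List.cons_append, List.foldl_cons]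
      have hlen : ¬ ((temp ++ [s]).length == 10) = true := by
        simp at h ⊢; omega
      simp only [pvStepA, hlen, if_neg, Bool.false_eq_true, not_false_iff]
      rw [ih (temp ++ [s]) (by simp at h ⊢; omega)]
      simp

-- A's loop computes pvChunks
theorem pvA_eq_chunks (l : List String) :
    (if (l.foldl pvStepA ([], [])).2.length > 0
      then (l.foldl pvStepA ([], [])).1 ++ [PySem.Str.join "," (l.foldl pvStepA ([], [])).2]
      else (l.foldl pvStepA ([], [])).1) = pvChunks l := by
  induction hn : l.length using Nat.strong_induction_on generalizing l with
  | _ n ih =>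
  match l with
  | [] => simp [pvChunks_nil]
  | x :: xs =>
    by_cases hlen : (x :: xs).length < 10
    · -- short list: no flush, final temp = l
      have h1 := pvFoldA_consume (x :: xs) [] [] [] (by simpa using hlen)
      simp only [List.append_nil, List.foldl_nil, List.nil_append] at h1
      rw [h1]
      have htake : (x :: xs).take 10 = x :: xs := List.take_of_length_le (by omega)
      have hdrop : xs.drop 9 = [] := List.drop_eq_nil_of_le (by have := hlen; simp at this; omega)
      simp [pvChunks_cons, htake, hdrop, pvChunks_nil]
    · -- at least 10 elements: consume 9, flush on the 10th, recurse
      push_neg at hlen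
      set L := x :: xs with hL
      have h9 : 9 < L.length := by omega
      have hsplit : L = L.take 9 ++ L.drop 9 := (List.take_append_drop 9 L).symm
      have hdrop9 : L.drop 9 = L[9] :: L.drop 10 := List.drop_eq_getElem_cons h9
      have hcons : L.foldl pvStepA ([], []) = (L.drop 9).foldl pvStepA ([], L.take 9) := by
        conv_lhs => rw [hsplit]
        refine (pvFoldA_consume _ _ _ _ ?_).trans (by simp)
        simp
      have htake10 : L.take 9 ++ [L[9]] = L.take 10 := by
        have h := List.take_concat_get (l := L) h9
        simpa [List.concat_eq_append] using h
      have hflush : (L.drop 9).foldl pvStepA ([], L.take 9)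
          = (L.drop 10).foldl pvStepA ([PySem.Str.join "," (L.take 10)], []) := by
        rw [hdrop9, List.foldl_cons]
        have hlen10 : ((L.take 9 ++ [L[9]]).length == 10) = true := by
          simp only [htake10]; simp [List.length_take]; omega
        simp only [pvStepA, hlen10, if_pos]
        rw [htake10]
        simp
      rw [hcons, hflush, pvFoldA_prefix]
      have hrec := ih ((L.drop 10).length) (by simp [hL] at hn ⊢; omega) (L.drop 10) rfl
      have hd : xs.drop 9 = L.drop 10 := by simp [hL]
      rw [pvChunks_cons, hd, ← hrec]
      split_ifs <;> rfl

-- B's comprehension computes pvChunks: m is the number of chunks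
theorem pvB_range (m : Nat) (l : List String)
    (h1 : l.length ≤ 10 * m) (h2 : 10 * m < l.length + 10) :
    (List.range m).map (fun k => PySem.Str.join "," ((l.drop (10 * k)).take 10)) = pvChunks l := by
  induction m generalizing l with
  | zero =>
      have : l = [] := by
        cases l with
        | nil => rfl
        | cons a as => simp at h1
      simp [this, pvChunks_nil]
  | succ m ih =>
      have hpos : 0 < l.length := by omega
      match l, h1, h2, hpos with
      | x :: xs, h1, h2, _ =>
        simp only [List.length_cons] at h1 h2
        rw [List.range_succ_eq_map, List.map_cons, List.map_map, pvChunks_cons]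
        have hd : xs.drop 9 = (x :: xs).drop 10 := rfl
        rw [hd, ← ih ((x :: xs).drop 10) (by simp only [List.length_drop, List.length_cons]; omega) (by simp only [List.length_drop, List.length_cons]; omega)]
        congr 1
        apply List.map_congr_left
        intro k _
        simp only [Function.comp]
        congr 1
        rw [List.drop_drop]
        have hk : 10 * Nat.succ k = 10 + 10 * k := by omega
        rw [hk]

theorem pvB_eq_chunks (l : List String) :
    (PySem.List.pyRange 0 (l.length : Int) 10).map
      (fun i => PySem.Str.join "," (PySem.List.slice l (some i) (some (i + 10)))) = pvChunks l := by
  rw [PySem.List.pyRange_of_pos 0 (l.length : Int) (by norm_num), List.map_map]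
  by_cases hl : l = []
  · subst hl; simp [pvChunks_nil]
  · have hne : l.length ≠ 0 := by simpa using hl
    have hpos : (0 : Int) < (l.length : Int) := by omega
    rw [if_pos hpos]
    have hto : (((l.length : Int) - 0 + 10 - 1) / 10).toNat = (l.length + 9) / 10 := by omega
    rw [hto]
    rw [← pvB_range ((l.length + 9) / 10) l (by omega) (by omega)]
    apply List.map_congr_left
    intro k _
    simp only [Function.comp]
    congr 1
    have ha : (0 : Int) ≤ 0 + 10 * (k : Int) := by positivity
    rw [PySem.List.slice_toNat l ha (by omega)]
    have e1 : ((0 : Int) + 10 * (k : Int) + 10).toNat - ((0 : Int) + 10 * (k : Int)).toNat = 10 := by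
      omega
    have e2 : ((0 : Int) + 10 * (k : Int)).toNat = 10 * k := by omega
    rw [e1, e2]

-- ===== VERDICT (by name: the statement is the Claim_ definition above) =====
theorem split_port_10_spec : Claim_equal_split_port_10 := by
  intro ports _
  unfold Spec_split_port_10 split_port_10 split_port_10_alt
  rw [pvA_eq_chunks, pvB_eq_chunks]
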